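-- pv_equiv track=rewrite | github.com/nxixi/apm- | chaint_root.py | build_system_msgtype_map
-- ===== SOURCE A (Python) =====
-- def build_system_msgtype_map(root_conditions):
--     """构建系统到交易码的映射"""
--     from collections import defaultdict
--     system_to_msgtypes = defaultdict(set)
--     all_systems = set()
--     all_msgtypes = set()
--
--     for system, msgtype in root_conditions:
--         system_to_msgtypes[system].add(msgtype)
--         all_systems.add(system)
--         all_msgtypes.add(msgtype)
--
--     return system_to_msgtypes, sorted(all_systems), sorted(all_msgtypes)
-- ===== SOURCE B (Python) =====
-- def build_system_msgtype_map(root_conditions):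
--     """构建系统到交易码的映射"""
--     from collections import defaultdict
--     systems = list(dict.fromkeys(s for s, _ in root_conditions))
--     system_to_msgtypes = defaultdict(set)
--     for s in systems:
--         system_to_msgtypes[s] = {m for s2, m in root_conditions if s2 == s}
--     all_msgtypes = sorted({m for _, m in root_conditions})
--     return system_to_msgtypes, sorted(systems), all_msgtypes
-- ===== Notes on version B (the rewrite author's own statement) =====
-- stated objective: simpler
-- what changed: B drops A's three parallel accumulators: it dedups the system column once, builds each system's msgtype set by a comprehension over the input, and derives both sorted lists from set comprehensions over the columns instead of sets maintained inside the loop.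
import Mathlib
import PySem

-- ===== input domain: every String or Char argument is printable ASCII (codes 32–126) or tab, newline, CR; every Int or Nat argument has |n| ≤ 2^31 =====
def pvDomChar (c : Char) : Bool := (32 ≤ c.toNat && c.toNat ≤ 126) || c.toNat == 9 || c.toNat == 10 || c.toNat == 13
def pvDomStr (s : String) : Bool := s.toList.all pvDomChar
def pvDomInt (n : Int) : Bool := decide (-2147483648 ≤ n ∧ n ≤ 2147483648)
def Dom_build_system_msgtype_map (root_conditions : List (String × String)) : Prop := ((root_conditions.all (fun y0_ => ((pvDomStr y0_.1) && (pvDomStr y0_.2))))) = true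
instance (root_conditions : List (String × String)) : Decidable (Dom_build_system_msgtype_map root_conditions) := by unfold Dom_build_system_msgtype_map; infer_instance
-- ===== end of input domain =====

-- B replaces A's three in-loop accumulators by a dedup of the system column plus per-system
-- set comprehensions; objective: simpler. (B is not faster; same behaviour.)

-- ===== PORT A =====
-- one loop maintaining (defaultdict(set), all_systems set, all_msgtypes set)
def build_system_msgtype_map (root_conditions : List (String × String)) : (List (String × List String)) × List String × List String :=
  let st := root_conditions.foldl
    (fun (acc : PySem.Dict String (PySem.Set String) × PySem.Set String × PySem.Set String) p =>
      (acc.1.insert p.1 (PySem.Set.add (acc.1.getD p.1 PySem.Set.empty) p.2),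
       PySem.Set.add acc.2.1 p.1,
       PySem.Set.add acc.2.2 p.2))
    (PySem.Dict.empty, PySem.Set.empty, PySem.Set.empty)
  (st.1.items,
   PySem.List.sorted st.2.1 (fun x => x) false,
   PySem.List.sorted st.2.2 (fun x => x) false)

-- ===== PORT B =====
-- dedup of the system column, then one dict insert per distinct system
def build_system_msgtype_map_alt (root_conditions : List (String × String)) : (List (String × List String)) × List String × List String :=
  let systems := PySem.List.dedup (root_conditions.map Prod.fst)
  let d := systems.foldl
    (fun (d : PySem.Dict String (PySem.Set String)) s =>
      d.insert s (PySem.Set.ofList ((root_conditions.filter (fun p => p.1 == s)).map Prod.snd)))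
    PySem.Dict.empty
  (d.items,
   PySem.List.sorted systems (fun x => x) false,
   PySem.List.sorted (PySem.Set.ofList (root_conditions.map Prod.snd)) (fun x => x) false)

-- ===== PRECONDITION & SPEC =====
def Spec_build_system_msgtype_map (root_conditions : List (String × String)) (out : (List (String × List String)) × List String × List String) : Prop := out = build_system_msgtype_map_alt root_conditions
instance (root_conditions : List (String × String)) (out : (List (String × List String)) × List String × List String) : Decidable (Spec_build_system_msgtype_map root_conditions out) := by unfold Spec_build_system_msgtype_map; infer_instance

-- ===== CLAIM (what is proved, stated in full; the proofs are below) =====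
def Claim_equal_build_system_msgtype_map : Prop := ∀ (root_conditions : List (String × String)), Dom_build_system_msgtype_map root_conditions → Spec_build_system_msgtype_map root_conditions (build_system_msgtype_map root_conditions)

-- ===== LEMMAS AND PROOFS =====

-- A's triple fold splits into three independent folds
theorem pv_foldl_triple (rc : List (String × String))
    (d : PySem.Dict String (PySem.Set String)) (s m : PySem.Set String) :
    rc.foldl
      (fun (acc : PySem.Dict String (PySem.Set String) × PySem.Set String × PySem.Set String) p =>
        (acc.1.insert p.1 (PySem.Set.add (acc.1.getD p.1 PySem.Set.empty) p.2),
         PySem.Set.add acc.2.1 p.1,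
         PySem.Set.add acc.2.2 p.2)) (d, s, m)
    = (rc.foldl (fun d p => d.insert p.1 (PySem.Set.add (d.getD p.1 PySem.Set.empty) p.2)) d,
       rc.foldl (fun s p => PySem.Set.add s p.1) s,
       rc.foldl (fun m p => PySem.Set.add m p.2) m) := by
  induction rc generalizing d s m with
  | nil => rfl
  | cons p t ih => simp only [List.foldl]; exact ih _ _ _

-- the value A's dict holds at any key s, after folding from d
theorem pv_getD_foldl (rc : List (String × String)) (d : PySem.Dict String (PySem.Set String))
    (s : String) :
    (rc.foldl (fun d p => d.insert p.1 (PySem.Set.add (d.getD p.1 PySem.Set.empty) p.2)) d).getD s PySem.Set.empty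
    = PySem.Set.update (d.getD s PySem.Set.empty) ((rc.filter (fun p => p.1 == s)).map Prod.snd) := by
  induction rc generalizing d with
  | nil => simp [PySem.Set.update_nil]
  | cons p t ih =>
    simp only [List.foldl, List.filter_cons]
    by_cases h : p.1 = s
    · subst h
      rw [ih, PySem.Dict.getD_insert_self]
      simp [PySem.Set.update_cons]
    · have hb : (p.1 == s) = false := by simpa using h
      rw [ih]
      simp only [hb, Bool.false_eq_true, if_false]
      rw [PySem.Dict.getD_insert_of_ne]
      exact Ne.symm h

theorem build_system_msgtype_map_eq (rc : List (String × String)) :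
    build_system_msgtype_map rc = build_system_msgtype_map_alt rc := by
  unfold build_system_msgtype_map build_system_msgtype_map_alt
  rw [pv_foldl_triple]
  simp only
  refine Prod.ext ?_ (Prod.ext ?_ ?_)
  · -- dict items agree
    set DA := rc.foldl (fun d p => d.insert p.1 (PySem.Set.add (d.getD p.1 PySem.Set.empty) p.2))
        PySem.Dict.empty with hDA
    have hkeys : DA.keys = PySem.List.dedup (rc.map Prod.fst) := by
      rw [hDA, PySem.Dict.keys_foldl_insert_key rc Prod.fst _ PySem.Dict.empty]
      show PySem.Set.update [] _ = _
      rw [PySem.Set.update_nil_left]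
      simp
    have hnd : DA.keys.Nodup := by
      rw [hkeys]; exact PySem.List.nodup_dedup _
    have hitems : DA.items = DA.keys.map (fun k => (k, DA.getD k PySem.Set.empty)) :=
      PySem.Dict.items_eq_map_keys DA hnd PySem.Set.empty
    have hfresh : (PySem.List.dedup (rc.map Prod.fst)).foldl
        (fun (d : PySem.Dict String (PySem.Set String)) s =>
          d.insert s (PySem.Set.ofList ((rc.filter (fun p => p.1 == s)).map Prod.snd)))
        PySem.Dict.empty
        = PySem.Dict.mk ((PySem.List.dedup (rc.map Prod.fst)).map
            (fun s => (s, PySem.Set.ofList ((rc.filter (fun p => p.1 == s)).map Prod.snd)))) := by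
      apply PySem.Dict.ext
      rw [PySem.Dict.items_foldl_insert_fresh]
      · rfl
      · intro a _; exact PySem.Dict.contains_empty a
      · simp
    rw [hitems, hkeys, hfresh]
    apply List.map_congr_left
    intro s _
    rw [hDA, pv_getD_foldl, PySem.Dict.getD_empty, PySem.Set.update_empty]
  · -- sorted systems agree
    have : rc.foldl (fun s p => PySem.Set.add s p.1) PySem.Set.empty
        = PySem.List.dedup (rc.map Prod.fst) := by
      rw [← PySem.Set.update_map_eq_foldl_add, PySem.Set.update_empty]
      simp
    rw [this]
  · -- sorted msgtypes agree
    have : rc.foldl (fun m p => PySem.Set.add m p.2) PySem.Set.empty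
        = PySem.Set.ofList (rc.map Prod.snd) := by
      rw [← PySem.Set.update_map_eq_foldl_add, PySem.Set.update_empty]
    rw [this]

-- ===== VERDICT (by name: the statement is the Claim_ definition above) =====
theorem build_system_msgtype_map_spec : Claim_equal_build_system_msgtype_map := by
  intro rc _
  unfold Spec_build_system_msgtype_map
  exact build_system_msgtype_map_eq rc
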